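-- pv_equiv track=rewrite | github.com/jonadaly/advent | advent_2021/calendar-23.py | room_available
-- ===== SOURCE A (Python) =====
-- def find_last_dot(arg):
--     """Helper to guard for the ValueError."""
--     try:
--         return "".join(arg).rindex(".")
--     except ValueError:
--         return 0
--
-- def room_available(_state: list, room: str):
--     """
--     Checks whether a room is available to be moved into. If the room is available, returns a tuple of
--     True and the index of the next available space. If the room is unavailable, returns a tuple of
--     False and the index of the outermost occupied space.
--     """
--     if room == "A":
--         if all(s in [".", "A"] for s in _state[11:15]):
--             return True, 11 + find_last_dot(_state[11:15])
--         else: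
--             return False, next(
--                 i for i, s in enumerate(_state) if 11 <= i < 15 and s != "."
--             )
--     if room == "B":
--         if all(s in [".", "B"] for s in _state[15:19]):
--             return True, 15 + find_last_dot(_state[15:19])
--         else:
--             return False, next(
--                 i for i, s in enumerate(_state) if 15 <= i < 19 and s != "."
--             )
--     if room == "C":
--         if all(s in [".", "C"] for s in _state[19:23]):
--             return True, 19 + find_last_dot(_state[19:23])
--         else:
--             return False, next(
--                 i for i, s in enumerate(_state) if 19 <= i < 23 and s != "."
--             )
--     if room == "D":
--         if all(s in [".", "D"] for s in _state[23:27]):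
--             return True, 23 + find_last_dot(_state[23:27])
--         else:
--             return False, next(
--                 i for i, s in enumerate(_state) if 23 <= i < 27 and s != "."
--             )
--     raise ValueError
-- ===== SOURCE B (Python) =====
-- def _scan(seq, target):
--     """One recursive pass: (all cells '.' or target, last '.' index or None, first non-'.' index or None)."""
--     if not seq:
--         return True, None, None
--     head = seq[0]
--     ok, ld, fo = _scan(seq[1:], target)
--     ok = ok and head in (".", target)
--     if ld is not None:
--         ld = ld + 1
--     elif head == ".":
--         ld = 0
--     fo = 0 if head != "." else (None if fo is None else fo + 1)
--     return ok, ld, fo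
--
--
-- def room_available(_state: list, room: str):
--     starts = {"A": 11, "B": 15, "C": 19, "D": 23}
--     if room not in starts:
--         raise ValueError
--     start = starts[room]
--     ok, last_dot, first_occ = _scan(_state[start:start + 4], room)
--     if ok:
--         return True, start + (0 if last_dot is None else last_dot)
--     return False, start + first_occ
-- ===== Notes on version B (the rewrite author's own statement) =====
-- stated objective: alternative
-- what changed: A's three separate scans per room branch (an all() membership pass, a rindex over a joined string, and a next() over enumerate of the whole state) are fused into one recursive pass over the 4-cell room slice that tracks the all-home flag, the last '.' index and the first occupied index at once, with the four copy-pasted room branches replaced by a start-index table.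
import Mathlib
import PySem

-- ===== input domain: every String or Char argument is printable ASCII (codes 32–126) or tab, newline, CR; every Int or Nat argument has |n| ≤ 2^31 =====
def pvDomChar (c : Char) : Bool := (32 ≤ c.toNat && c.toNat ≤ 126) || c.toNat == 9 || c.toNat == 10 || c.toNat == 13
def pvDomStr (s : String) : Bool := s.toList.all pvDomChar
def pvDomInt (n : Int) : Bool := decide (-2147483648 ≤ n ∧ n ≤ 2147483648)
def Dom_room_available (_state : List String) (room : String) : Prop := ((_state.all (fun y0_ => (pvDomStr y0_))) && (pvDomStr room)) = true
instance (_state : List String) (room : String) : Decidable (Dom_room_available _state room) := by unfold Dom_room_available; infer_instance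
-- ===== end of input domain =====

-- B fuses A's three scans (all / rindex-of-join / next-over-enumerate) into one recursive pass
-- over the 4-cell room slice; equal return values on every room in "ABCD" (elsewhere both raise ValueError).

-- ===== PORT A =====
-- find_last_dot: "".join(arg).rindex("."), ValueError (rfind = -1) caught as 0
def find_last_dot (arg : List String) : Int :=
  let r := PySem.Str.rfind (PySem.Str.join "" arg) "."
  if r = -1 then 0 else r

def room_available (_state : List String) (room : String) : Bool × Int :=
  if room == "A" then
    if (PySem.List.slice _state (some 11) (some 15)).all (fun s => s == "." || s == "A") then
      (true, 11 + find_last_dot (PySem.List.slice _state (some 11) (some 15)))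
    else
      -- next(...): the generator always yields here, so the default 0 is never used
      (false, (((PySem.List.enumerate _state 0).find?
        (fun p => decide ((11:Int) ≤ p.1) && decide (p.1 < 15) && !(p.2 == "."))).map Prod.fst).getD 0)
  else if room == "B" then
    if (PySem.List.slice _state (some 15) (some 19)).all (fun s => s == "." || s == "B") then
      (true, 15 + find_last_dot (PySem.List.slice _state (some 15) (some 19)))
    else
      (false, (((PySem.List.enumerate _state 0).find?
        (fun p => decide ((15:Int) ≤ p.1) && decide (p.1 < 19) && !(p.2 == "."))).map Prod.fst).getD 0)
  else if room == "C" then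
    if (PySem.List.slice _state (some 19) (some 23)).all (fun s => s == "." || s == "C") then
      (true, 19 + find_last_dot (PySem.List.slice _state (some 19) (some 23)))
    else
      (false, (((PySem.List.enumerate _state 0).find?
        (fun p => decide ((19:Int) ≤ p.1) && decide (p.1 < 23) && !(p.2 == "."))).map Prod.fst).getD 0)
  else if room == "D" then
    if (PySem.List.slice _state (some 23) (some 27)).all (fun s => s == "." || s == "D") then
      (true, 23 + find_last_dot (PySem.List.slice _state (some 23) (some 27)))
    else
      (false, (((PySem.List.enumerate _state 0).find?
        (fun p => decide ((23:Int) ≤ p.1) && decide (p.1 < 27) && !(p.2 == "."))).map Prod.fst).getD 0)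
  else (false, 0)  -- Python: raise ValueError (excluded by Pre_)

-- ===== PORT B =====
-- _scan: one recursive pass; (all cells '.' or target, last '.' index or none, first non-'.' index or none)
def pvScan (seq : List String) (target : String) : Bool × Option Int × Option Int :=
  match seq with
  | [] => (true, none, none)
  | head :: tail =>
    let r := pvScan tail target
    let ok := r.1 && (head == "." || head == target)
    let ld : Option Int :=
      match r.2.1 with
      | some j => some (j + 1)
      | none => if head == "." then some 0 else none
    let fo : Option Int := if !(head == ".") then some 0 else r.2.2.map (· + 1)
    (ok, ld, fo)

def room_available_alt (_state : List String) (room : String) : Bool × Int :=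
  let starts : PySem.Dict String Int := PySem.Dict.ofList [("A", 11), ("B", 15), ("C", 19), ("D", 23)]
  match PySem.Dict.get? starts room with
  | none => (false, 0)  -- Python: raise ValueError (excluded by Pre_)
  | some start =>
    let r := pvScan (PySem.List.slice _state (some start) (some (start + 4))) room
    if r.1 then (true, start + r.2.1.getD 0)
    else (false, start + r.2.2.getD 0)  -- first_occ is always set here; the default is never used

-- ===== PRECONDITION & SPEC =====
-- Pre_ excludes exactly the rooms on which A (and B) raise ValueError.
def Pre_room_available (_state : List String) (room : String) : Prop :=
  room = "A" ∨ room = "B" ∨ room = "C" ∨ room = "D"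
instance (_state : List String) (room : String) : Decidable (Pre_room_available _state room) := by
  unfold Pre_room_available; infer_instance
def pvWitness_room_available : List String × String :=
  (["x","x","x","x","x","x","x","x","x","x","x", ".", ".", ".", ".", "B", ".", "B", "B"], "A")

def Spec_room_available (_state : List String) (room : String) (out : Bool × Int) : Prop := out = room_available_alt _state room
instance (_state : List String) (room : String) (out : Bool × Int) : Decidable (Spec_room_available _state room out) := by unfold Spec_room_available; infer_instance

-- ===== CLAIM (what is proved, stated in full; the proofs are below) =====
def Claim_equal_room_available : Prop := ∀ (_state : List String) (room : String), Dom_room_available _state room → Pre_room_available _state room → Spec_room_available _state room (room_available _state room)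

-- ===== LEMMAS AND PROOFS =====

-- pvScan's first component is A's `all` test
theorem pvScan_fst (L : String) (ys : List String) :
    (pvScan ys L).1 = ys.all (fun s => s == "." || s == L) := by
  induction ys with
  | nil => rfl
  | cons x t ih => simp [pvScan, ih, Bool.and_comm]

-- pvScan's third component is the first non-'.' index of the slice
theorem pvScan_fo (L : String) (ys : List String) :
    (pvScan ys L).2.2 = (ys.findIdx? (fun s => !(s == "."))).map (fun j => (j : Int)) := by
  induction ys with
  | nil => rfl
  | cons x t ih =>
    by_cases hx : x == "."
    · simp only [pvScan, hx, ih, List.findIdx?_cons, Bool.not_true]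
      rw [if_neg (by simp)]
      cases t.findIdx? (fun s => !(s == ".")) <;> simp
    · simp [pvScan, hx, List.findIdx?_cons]

theorem find_enum_map (q : String → Bool) (ys : List String) (s : Int) :
    ((PySem.List.enumerate ys s).find? (fun p => q p.2)).map Prod.fst
      = (ys.findIdx? q).map (fun j => s + (j : Int)) := by
  induction ys generalizing s with
  | nil => simp [PySem.List.enumerate]
  | cons x t ih =>
    rw [PySem.List.enumerate_cons]
    by_cases hq : q x
    · simp [List.find?_cons, hq, List.findIdx?_cons]
    · simp [hq, List.findIdx?_cons, ih (s + 1)]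
      cases t.findIdx? q <;> simp <;> ring

theorem find?_congr_mem {α : Type} (l : List α) (p q : α → Bool)
    (h : ∀ x ∈ l, p x = q x) : l.find? p = l.find? q := by
  induction l with
  | nil => rfl
  | cons x t ih =>
    simp only [List.find?_cons, h x (by simp)]
    split <;> [rfl; exact ih (fun y hy => h y (by simp [hy]))]

theorem enum_window (xs : List String) (a : Nat) :
    ((PySem.List.enumerate xs 0).find?
        (fun p => decide ((a : Int) ≤ p.1) && decide (p.1 < (a : Int) + 4) && !(p.2 == "."))).map Prod.fst
      = (((xs.drop a).take 4).findIdx? (fun s => !(s == "."))).map (fun j => (a : Int) + j) := by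
  by_cases hl : xs.length < a
  · rw [List.drop_eq_nil_iff.mpr (by omega)]
    have hnone : ((PySem.List.enumerate xs 0).find?
        (fun p => decide ((a : Int) ≤ p.1) && decide (p.1 < (a : Int) + 4) && !(p.2 == "."))) = none := by
      rw [List.find?_eq_none]
      intro p hp
      obtain ⟨k, hk, rfl⟩ := (PySem.List.mem_enumerate_iff _ _ _).mp hp
      simp only [Bool.and_eq_true, decide_eq_true_eq]
      rintro ⟨⟨h1, h2⟩, -⟩
      omega
    simp [hnone]
  · have hsplit : xs = xs.take a ++ ((xs.drop a).take 4 ++ (xs.drop a).drop 4) := by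
      rw [List.take_append_drop, List.take_append_drop]
    have hlu : (xs.take a).length = a := by simp; omega
    conv_lhs => rw [hsplit]
    rw [PySem.List.enumerate_append, PySem.List.enumerate_append,
        List.find?_append, List.find?_append]
    have h1 : ((PySem.List.enumerate (xs.take a) 0).find?
        (fun p => decide ((a : Int) ≤ p.1) && decide (p.1 < (a : Int) + 4) && !(p.2 == "."))) = none := by
      rw [List.find?_eq_none]
      intro p hp
      obtain ⟨k, hk, rfl⟩ := (PySem.List.mem_enumerate_iff _ _ _).mp hp
      rw [hlu] at hk
      simp only [Bool.and_eq_true, decide_eq_true_eq]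
      rintro ⟨⟨h1, -⟩, -⟩
      omega
    have h3 : ((PySem.List.enumerate ((xs.drop a).drop 4)
          (0 + (xs.take a).length + ((xs.drop a).take 4).length)).find?
        (fun p => decide ((a : Int) ≤ p.1) && decide (p.1 < (a : Int) + 4) && !(p.2 == "."))) = none := by
      rw [List.find?_eq_none]
      intro p hp
      obtain ⟨k, hk, rfl⟩ := (PySem.List.mem_enumerate_iff _ _ _).mp hp
      have hw : a + 4 < xs.length := by
        have := hk; simp only [List.length_drop] at this; omega
      have hys : ((xs.drop a).take 4).length = 4 := by
        simp only [List.length_take, List.length_drop]; omega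
      simp only [Bool.and_eq_true, decide_eq_true_eq]
      rintro ⟨⟨-, h2⟩, -⟩
      omega
    rw [h1, Option.none_or, h3, Option.or_none, hlu]
    have hmid : ((PySem.List.enumerate ((xs.drop a).take 4) (0 + (a : Nat))).find?
        (fun p => decide ((a : Int) ≤ p.1) && decide (p.1 < (a : Int) + 4) && !(p.2 == ".")))
        = ((PySem.List.enumerate ((xs.drop a).take 4) ((a : Int))).find? (fun p => !(p.2 == "."))) := by
      rw [show ((0 : Int) + (a : Nat)) = ((a : Nat) : Int) by ring]
      apply find?_congr_mem
      intro p hp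
      obtain ⟨k, hk, rfl⟩ := (PySem.List.mem_enumerate_iff _ _ _).mp hp
      have : k < 4 := by
        have := hk; simp at this; omega
      simp only [Bool.and_eq_true, decide_eq_true_eq]
      have e1 : ((a : Int) ≤ (a : Int) + (k : Int)) := by omega
      have e2 : ((a : Int) + (k : Int) < (a : Int) + 4) := by omega
      simp [e1, e2]
    rw [hmid, find_enum_map (fun s => !(s == "."))]

theorem fld_A (ys : List String) (hlen : ys.length ≤ 4)
    (h : ys.all (fun s => s == "." || s == "A") = true) :
    find_last_dot ys = (pvScan ys "A").2.1.getD 0 := by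
  rcases ys with _ | ⟨x0, _ | ⟨x1, _ | ⟨x2, _ | ⟨x3, _ | ⟨x4, t⟩⟩⟩⟩⟩
  · decide
  · simp only [List.all_cons, List.all_nil, Bool.and_eq_true, Bool.or_eq_true, beq_iff_eq] at h
    rcases h with ⟨rfl | rfl, -⟩ <;> decide
  · simp only [List.all_cons, List.all_nil, Bool.and_eq_true, Bool.or_eq_true, beq_iff_eq] at h
    rcases h with ⟨rfl | rfl, rfl | rfl, -⟩ <;> decide
  · simp only [List.all_cons, List.all_nil, Bool.and_eq_true, Bool.or_eq_true, beq_iff_eq] at h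
    rcases h with ⟨rfl | rfl, rfl | rfl, rfl | rfl, -⟩ <;> decide
  · simp only [List.all_cons, List.all_nil, Bool.and_eq_true, Bool.or_eq_true, beq_iff_eq] at h
    rcases h with ⟨rfl | rfl, rfl | rfl, rfl | rfl, rfl | rfl, -⟩ <;> decide
  · simp at hlen; omega

theorem fld_B (ys : List String) (hlen : ys.length ≤ 4)
    (h : ys.all (fun s => s == "." || s == "B") = true) :
    find_last_dot ys = (pvScan ys "B").2.1.getD 0 := by
  rcases ys with _ | ⟨x0, _ | ⟨x1, _ | ⟨x2, _ | ⟨x3, _ | ⟨x4, t⟩⟩⟩⟩⟩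
  · decide
  · simp only [List.all_cons, List.all_nil, Bool.and_eq_true, Bool.or_eq_true, beq_iff_eq] at h
    rcases h with ⟨rfl | rfl, -⟩ <;> decide
  · simp only [List.all_cons, List.all_nil, Bool.and_eq_true, Bool.or_eq_true, beq_iff_eq] at h
    rcases h with ⟨rfl | rfl, rfl | rfl, -⟩ <;> decide
  · simp only [List.all_cons, List.all_nil, Bool.and_eq_true, Bool.or_eq_true, beq_iff_eq] at h
    rcases h with ⟨rfl | rfl, rfl | rfl, rfl | rfl, -⟩ <;> decide
  · simp only [List.all_cons, List.all_nil, Bool.and_eq_true, Bool.or_eq_true, beq_iff_eq] at h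
    rcases h with ⟨rfl | rfl, rfl | rfl, rfl | rfl, rfl | rfl, -⟩ <;> decide
  · simp at hlen; omega

theorem fld_C (ys : List String) (hlen : ys.length ≤ 4)
    (h : ys.all (fun s => s == "." || s == "C") = true) :
    find_last_dot ys = (pvScan ys "C").2.1.getD 0 := by
  rcases ys with _ | ⟨x0, _ | ⟨x1, _ | ⟨x2, _ | ⟨x3, _ | ⟨x4, t⟩⟩⟩⟩⟩
  · decide
  · simp only [List.all_cons, List.all_nil, Bool.and_eq_true, Bool.or_eq_true, beq_iff_eq] at h
    rcases h with ⟨rfl | rfl, -⟩ <;> decide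
  · simp only [List.all_cons, List.all_nil, Bool.and_eq_true, Bool.or_eq_true, beq_iff_eq] at h
    rcases h with ⟨rfl | rfl, rfl | rfl, -⟩ <;> decide
  · simp only [List.all_cons, List.all_nil, Bool.and_eq_true, Bool.or_eq_true, beq_iff_eq] at h
    rcases h with ⟨rfl | rfl, rfl | rfl, rfl | rfl, -⟩ <;> decide
  · simp only [List.all_cons, List.all_nil, Bool.and_eq_true, Bool.or_eq_true, beq_iff_eq] at h
    rcases h with ⟨rfl | rfl, rfl | rfl, rfl | rfl, rfl | rfl, -⟩ <;> decide
  · simp at hlen; omega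

theorem fld_D (ys : List String) (hlen : ys.length ≤ 4)
    (h : ys.all (fun s => s == "." || s == "D") = true) :
    find_last_dot ys = (pvScan ys "D").2.1.getD 0 := by
  rcases ys with _ | ⟨x0, _ | ⟨x1, _ | ⟨x2, _ | ⟨x3, _ | ⟨x4, t⟩⟩⟩⟩⟩
  · decide
  · simp only [List.all_cons, List.all_nil, Bool.and_eq_true, Bool.or_eq_true, beq_iff_eq] at h
    rcases h with ⟨rfl | rfl, -⟩ <;> decide
  · simp only [List.all_cons, List.all_nil, Bool.and_eq_true, Bool.or_eq_true, beq_iff_eq] at h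
    rcases h with ⟨rfl | rfl, rfl | rfl, -⟩ <;> decide
  · simp only [List.all_cons, List.all_nil, Bool.and_eq_true, Bool.or_eq_true, beq_iff_eq] at h
    rcases h with ⟨rfl | rfl, rfl | rfl, rfl | rfl, -⟩ <;> decide
  · simp only [List.all_cons, List.all_nil, Bool.and_eq_true, Bool.or_eq_true, beq_iff_eq] at h
    rcases h with ⟨rfl | rfl, rfl | rfl, rfl | rfl, rfl | rfl, -⟩ <;> decide
  · simp at hlen; omega


-- one room branch of A equals one room branch of B
theorem branch_eq (xs : List String) (a : Nat) (L : String)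
    (hfld : ∀ ys : List String, ys.length ≤ 4 → ys.all (fun s => s == "." || s == L) = true →
      find_last_dot ys = (pvScan ys L).2.1.getD 0) :
    (if ((xs.drop a).take 4).all (fun s => s == "." || s == L) then
       ((true : Bool), (a : Int) + find_last_dot ((xs.drop a).take 4))
     else
       (false, (((PySem.List.enumerate xs 0).find?
          (fun p => decide ((a : Int) ≤ p.1) && decide (p.1 < (a : Int) + 4) && !(p.2 == "."))).map
            Prod.fst).getD 0))
    = (if (pvScan ((xs.drop a).take 4) L).1 then
         ((true : Bool), (a : Int) + (pvScan ((xs.drop a).take 4) L).2.1.getD 0)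
       else (false, (a : Int) + (pvScan ((xs.drop a).take 4) L).2.2.getD 0)) := by
  by_cases hall : ((xs.drop a).take 4).all (fun s => s == "." || s == L) = true
  · rw [if_pos hall, if_pos (by rw [pvScan_fst]; exact hall),
      hfld _ (List.length_take_le 4 _) hall]
  · rw [if_neg hall, if_neg (by rw [pvScan_fst]; exact hall), enum_window, pvScan_fo]
    obtain ⟨j, hj⟩ : ∃ j, ((xs.drop a).take 4).findIdx? (fun s => !(s == ".")) = some j := by
      cases hfi : ((xs.drop a).take 4).findIdx? (fun s => !(s == ".")) with
      | some j => exact ⟨j, rfl⟩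
      | none =>
        exfalso
        apply hall
        rw [List.all_eq_true]
        intro x hx
        have := List.findIdx?_eq_none_iff.mp hfi x hx
        simp only [Bool.not_eq_eq_eq_not, Bool.not_true, Bool.not_eq_false] at this
        simp [this]
    rw [hj]
    simp

-- ===== VERDICT (by name: the statement is the Claim_ definition above) =====
theorem room_available_spec : Claim_equal_room_available := by
  intro st room _ hpre
  unfold Spec_room_available
  rcases hpre with rfl | rfl | rfl | rfl
  · have hb := branch_eq st 11 "A" fld_A
    norm_num at hb
    have hd : (PySem.Dict.ofList [(("A":String), (11:Int)), ("B", 15), ("C", 19), ("D", 23)]).get? "A" = some 11 := by decide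
    simpa [room_available, room_available_alt, hd, PySem.List.slice_toNat st (a := 11) (b := 15) (by norm_num) (by norm_num), show ((11:Int)+4) = 15 by norm_num] using hb
  · have hb := branch_eq st 15 "B" fld_B
    norm_num at hb
    have hd : (PySem.Dict.ofList [(("A":String), (11:Int)), ("B", 15), ("C", 19), ("D", 23)]).get? "B" = some 15 := by decide
    simpa [room_available, room_available_alt, hd, PySem.List.slice_toNat st (a := 15) (b := 19) (by norm_num) (by norm_num), show ((15:Int)+4) = 19 by norm_num] using hb
  · have hb := branch_eq st 19 "C" fld_C
    norm_num at hb
    have hd : (PySem.Dict.ofList [(("A":String), (11:Int)), ("B", 15), ("C", 19), ("D", 23)]).get? "C" = some 19 := by decide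
    simpa [room_available, room_available_alt, hd, PySem.List.slice_toNat st (a := 19) (b := 23) (by norm_num) (by norm_num), show ((19:Int)+4) = 23 by norm_num] using hb
  · have hb := branch_eq st 23 "D" fld_D
    norm_num at hb
    have hd : (PySem.Dict.ofList [(("A":String), (11:Int)), ("B", 15), ("C", 19), ("D", 23)]).get? "D" = some 23 := by decide
    simpa [room_available, room_available_alt, hd, PySem.List.slice_toNat st (a := 23) (b := 27) (by norm_num) (by norm_num), show ((23:Int)+4) = 27 by norm_num] using hb
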